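-- pv_equiv track=rewrite | github.com/vicentcaselles/Coursera_Biology_Meets_Programming | Week_2_functions.py | GC_counter
-- ===== SOURCE A (Python) =====
-- def GC_counter(Genome):
--     G_minus_C = {}
--     ExtendedGenome = Genome + Genome[0:len(Genome)//2]
--     G_minus_C[0] = ExtendedGenome[0:len(Genome)//2].count("G") - ExtendedGenome[0:len(Genome)//2].count("C")
--     for i in range(1, len(Genome)):
--         G_minus_C[i] = G_minus_C[i-1]
--         if ExtendedGenome[i-1] == "G":
--             G_minus_C.update({i: G_minus_C[i] - 1})
--         if ExtendedGenome[i-1] == "C":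
--             G_minus_C.update({i: G_minus_C[i] + 1})
--         if ExtendedGenome[i + len(Genome)//2 - 1] == "G":
--             G_minus_C.update({i: G_minus_C[i] + 1})
--         if ExtendedGenome[i + len(Genome)//2 - 1] == "C":
--             G_minus_C.update({i: G_minus_C[i] - 1})
--     return G_minus_C
-- ===== SOURCE B (Python) =====
-- def GC_counter(Genome):
--     n = len(Genome)
--     ExtendedGenome = Genome + Genome[:n // 2]
--     pref = [0]
--     for ch in ExtendedGenome:
--         pref.append(pref[-1] + (ch == "G") - (ch == "C"))
--     return {i: pref[i + n // 2] - pref[i] for i in range(n)}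
-- ===== Notes on version B (the rewrite author's own statement) =====
-- stated objective: simpler
-- what changed: Replaces the incremental add-one-char/drop-one-char window update over a dict with a prefix-sum table over the extended genome and a uniform second pass computing each window as a difference of two table entries.
-- intended difference: On the empty genome A returns {0: 0}, a spurious entry for a position that does not exist (an artifact of unconditionally seeding key 0), while B returns {}, the intended empty map over positions 0..n-1. — e.g. on GC_counter(""): A returns [(0, 0)], B returns []
import Mathlib
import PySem

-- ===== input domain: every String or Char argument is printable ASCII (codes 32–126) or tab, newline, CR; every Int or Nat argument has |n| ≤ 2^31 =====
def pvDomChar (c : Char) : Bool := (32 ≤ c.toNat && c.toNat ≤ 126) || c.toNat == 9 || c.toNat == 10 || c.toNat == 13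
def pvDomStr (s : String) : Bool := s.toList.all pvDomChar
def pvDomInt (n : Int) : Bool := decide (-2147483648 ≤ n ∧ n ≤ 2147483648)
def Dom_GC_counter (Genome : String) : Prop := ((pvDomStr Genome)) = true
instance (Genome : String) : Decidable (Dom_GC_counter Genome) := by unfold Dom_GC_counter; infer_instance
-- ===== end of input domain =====

-- B replaces A's incremental window update with a prefix-sum table and a uniform
-- second pass (objective: simpler); on the empty genome B returns {} where A returns {0: 0}.


-- ===== PORT A =====
-- A-side helper: the body of A's for-loop (the four ifs update key i in place)
def GC_step (ext : List Char) (h : Int) (d : PySem.Dict Int Int) (i : Int) : PySem.Dict Int Int :=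
  let d := d.insert i (d.getD (i - 1) 0)
  let d := if PySem.List.pyGetD ext (i - 1) ' ' == 'G' then d.insert i (d.getD i 0 - 1) else d
  let d := if PySem.List.pyGetD ext (i - 1) ' ' == 'C' then d.insert i (d.getD i 0 + 1) else d
  let d := if PySem.List.pyGetD ext (i + h - 1) ' ' == 'G' then d.insert i (d.getD i 0 + 1) else d
  if PySem.List.pyGetD ext (i + h - 1) ' ' == 'C' then d.insert i (d.getD i 0 - 1) else d

def GC_counter (Genome : String) : List (Int × Int) :=
  let g := Genome.toList
  let n : Int := PySem.List.len g
  let h : Int := PySem.Int.floordiv n 2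
  let ext := g ++ PySem.List.slice g (some 0) (some h)
  let win := PySem.List.slice ext (some 0) (some h)
  let d0 : PySem.Dict Int Int :=
    PySem.Dict.empty.insert 0 ((PySem.List.count win 'G' : Int) - (PySem.List.count win 'C' : Int))
  ((PySem.List.pyRange 1 n 1).foldl (GC_step ext h) d0).items

-- ===== PORT B =====
def GC_counter_alt (Genome : String) : List (Int × Int) :=
  let g := Genome.toList
  let n : Int := PySem.List.len g
  let h : Int := PySem.Int.floordiv n 2
  let ext := g ++ PySem.List.slice g none (some h)
  let pref := ext.foldl (fun p ch =>
      p ++ [PySem.List.pyGetD p (-1) 0 + (if ch == 'G' then 1 else 0) - (if ch == 'C' then 1 else 0)]) [0]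
  ((PySem.List.pyRange 0 n 1).foldl (fun d i =>
      d.insert i (PySem.List.pyGetD pref (i + h) 0 - PySem.List.pyGetD pref i 0))
    (PySem.Dict.empty : PySem.Dict Int Int)).items

-- ===== PRECONDITION & SPEC =====
-- On the empty genome A returns {0: 0}, a spurious entry for a position that does not
-- exist (an artifact of unconditionally seeding key 0); B returns {}, the intended
-- empty map over positions 0..n-1.
def D_GC_counter (Genome : String) : Prop := Genome = ""
instance (Genome : String) : Decidable (D_GC_counter Genome) := by unfold D_GC_counter; infer_instance

def Spec_GC_counter (Genome : String) (out : List (Int × Int)) : Prop :=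
  ¬ D_GC_counter Genome → out = GC_counter_alt Genome
instance (Genome : String) (out : List (Int × Int)) : Decidable (Spec_GC_counter Genome out) := by
  unfold Spec_GC_counter; infer_instance

def pvDiffWitness_GC_counter : String := ""
def pvDiffWitnessOut_GC_counter : (List (Int × Int)) × (List (Int × Int)) := ([(0, 0)], [])

-- ===== CLAIM (what is proved, stated in full; the proofs are below) =====
def Claim_unchanged_GC_counter : Prop :=
  ∀ (Genome : String), Dom_GC_counter Genome → Spec_GC_counter Genome (GC_counter Genome)
def Claim_changed_GC_counter : Prop :=
  Dom_GC_counter (pvDiffWitness_GC_counter) ∧ D_GC_counter (pvDiffWitness_GC_counter) ∧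
  GC_counter (pvDiffWitness_GC_counter) = pvDiffWitnessOut_GC_counter.1 ∧
  GC_counter_alt (pvDiffWitness_GC_counter) = pvDiffWitnessOut_GC_counter.2 ∧
  pvDiffWitnessOut_GC_counter.1 ≠ pvDiffWitnessOut_GC_counter.2
def Claim_exact_GC_counter : Prop :=
  ∀ (Genome : String), Dom_GC_counter Genome → D_GC_counter Genome →
    GC_counter Genome ≠ GC_counter_alt Genome

-- ===== LEMMAS AND PROOFS =====

-- per-character G-minus-C weight
def pvDelta (c : Char) : Int := (if c == 'G' then 1 else 0) - (if c == 'C' then 1 else 0)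
-- prefix sum: G-minus-C count of l[:k]
def pvS (l : List Char) (k : Nat) : Int := ((l.take k).map pvDelta).sum

theorem pvS_succ (l : List Char) (k : Nat) (hk : k < l.length) :
    pvS l (k + 1) = pvS l k + pvDelta l[k] := by
  have hk' : k < (l.map pvDelta).length := by simpa using hk
  simp only [pvS, List.map_take]
  rw [List.sum_take_succ _ k hk', List.getElem_map]

theorem pv_count_sub (l : List Char) :
    ((l.count 'G' : Int) - (l.count 'C' : Int)) = (l.map pvDelta).sum := by
  induction l with
  | nil => simp
  | cons c t ih =>
    simp only [List.count_cons, List.map_cons, List.sum_cons]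
    push_cast
    rw [← ih]
    by_cases h1 : c = 'G' <;> by_cases h2 : c = 'C' <;> simp_all [pvDelta] <;> linarith [ih]

theorem pvS_cons (c : Char) (t : List Char) (k : Nat) :
    pvS (c :: t) (k + 1) = pvDelta c + pvS t k := by
  simp [pvS, List.take_succ_cons]

theorem pv_fold_pref (l : List Char) (a : Int) (p : List Int) (hp : p ≠ []) (hlast : p.getLast hp = a) :
    l.foldl (fun p ch =>
      p ++ [PySem.List.pyGetD p (-1) 0 + (if ch == 'G' then 1 else 0) - (if ch == 'C' then 1 else 0)]) p
    = p ++ (List.range l.length).map (fun k => a + pvS l (k + 1)) := by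
  induction l generalizing p a with
  | nil => simp
  | cons c t ih =>
    simp only [List.foldl_cons]
    rw [PySem.List.pyGetD_neg_one p 0 hp, hlast]
    have hstep : a + (if c == 'G' then 1 else 0) - (if c == 'C' then 1 else 0) = a + pvDelta c := by
      simp [pvDelta]; ring
    rw [hstep]
    rw [ih (a + pvDelta c) (p ++ [a + pvDelta c]) (by simp) (by simp)]
    rw [List.append_assoc]
    congr 1
    rw [List.length_cons, List.range_succ_eq_map]
    simp only [List.map_cons, List.map_map, List.singleton_append]
    congr 1
    · rw [pvS_cons]; simp [pvS]
    · apply List.map_congr_left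
      intro k _
      simp only [Function.comp]
      rw [pvS_cons]
      ring

theorem pv_four (ext : List Char) (hI : Int) (d : PySem.Dict Int Int) (i : Int)
    (hk : d.contains i = false) (v : Int) (hv : d.getD (i - 1) 0 = v) (a b : Char)
    (ha : PySem.List.pyGetD ext (i - 1) ' ' = a) (hb : PySem.List.pyGetD ext (i + hI - 1) ' ' = b) :
    (GC_step ext hI d i).items = d.items ++ [(i, v - pvDelta a + pvDelta b)] := by
  simp only [GC_step, hv, ha, hb]
  by_cases h1 : a = 'G' <;> by_cases h2 : a = 'C' <;> by_cases h3 : b = 'G' <;> by_cases h4 : b = 'C' <;>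
    first
    | (exfalso; subst h1; exact absurd h2 (by decide))
    | (exfalso; subst h3; exact absurd h4 (by decide))
    | (simp [h1, h2, h3, h4, PySem.Dict.getD_insert_self, PySem.Dict.insert_insert_self,
             PySem.Dict.items_insert_of_not_contains d _ hk, pvDelta]
       try ring)

theorem pv_step_items (ext : List Char) (hN : Nat) (d : PySem.Dict Int Int) (m : Nat)
    (hm : 1 ≤ m)
    (hd : d.items = (List.range m).map (fun j : Nat => ((j : Int), pvS ext (j + hN) - pvS ext j)))
    (hi1 : m - 1 < ext.length) (hi2 : m + hN - 1 < ext.length) :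
    (GC_step ext (hN : Int) d (m : Int)).items =
      (List.range (m + 1)).map (fun j : Nat => ((j : Int), pvS ext (j + hN) - pvS ext j)) := by
  have hkeys : d.keys = (List.range m).map (fun j : Nat => (j : Int)) := by
    simp only [PySem.Dict.keys, hd, List.map_map]; rfl
  have hnd : d.keys.Nodup := by
    rw [hkeys]
    exact List.nodup_range.map (fun a b hab => by exact_mod_cast hab)
  have hcont : d.contains (m : Int) = false := by
    rw [PySem.Dict.contains_eq_decide_mem_keys, hkeys]
    simp only [decide_eq_false_iff_not, List.mem_map, List.mem_range, not_exists]
    rintro j ⟨hj, hje⟩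
    have : j = m := by exact_mod_cast hje
    omega
  have hmem : (((m - 1 : Nat) : Int), pvS ext ((m - 1) + hN) - pvS ext (m - 1)) ∈ d.items := by
    rw [hd]
    exact List.mem_map_of_mem (by simp; omega)
  have hv0 : d.getD ((m : Int) - 1) 0 = pvS ext ((m - 1) + hN) - pvS ext (m - 1) := by
    have hc : ((m : Int) - 1) = ((m - 1 : Nat) : Int) := by omega
    rw [hc]
    exact PySem.Dict.getD_of_mem_items d hmem hnd 0
  have he1 : PySem.List.pyGetD ext ((m : Int) - 1) ' ' = ext[m - 1] := by
    rw [PySem.List.pyGetD_eq_getElem ext ' ' (by omega) (by omega)]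
    simp only [show ((m : Int) - 1).toNat = m - 1 from by omega]
  have he2 : PySem.List.pyGetD ext ((m : Int) + (hN : Int) - 1) ' ' = ext[m + hN - 1] := by
    rw [PySem.List.pyGetD_eq_getElem ext ' ' (by omega) (by omega)]
    simp only [show ((m : Int) + (hN : Int) - 1).toNat = m + hN - 1 from by omega]
  have hS1 : pvS ext m = pvS ext (m - 1) + pvDelta ext[m - 1] := by
    have := pvS_succ ext (m - 1) hi1
    rw [show m - 1 + 1 = m by omega] at this
    exact this
  have hS2 : pvS ext (m + hN) = pvS ext ((m - 1) + hN) + pvDelta ext[m + hN - 1] := by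
    have h0 := pvS_succ ext (m + hN - 1) hi2
    have h2 : pvS ext (m + hN - 1) = pvS ext ((m - 1) + hN) := by
      rw [show m + hN - 1 = (m - 1) + hN from by omega]
    rw [show m + hN - 1 + 1 = m + hN from by omega] at h0
    rw [h2] at h0
    exact h0
  rw [pv_four ext (hN : Int) d (m : Int) hcont _ hv0 _ _ he1 he2]
  rw [List.range_succ, List.map_append, ← hd]
  congr 2
  show ((m : Int), pvS ext (m - 1 + hN) - pvS ext (m - 1) - pvDelta ext[m - 1] + pvDelta ext[m + hN - 1])
      = ((m : Int), pvS ext (m + hN) - pvS ext m)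
  rw [Prod.mk.injEq, hS1, hS2]
  exact ⟨rfl, by ring⟩

theorem pv_A_loop (ext : List Char) (nN hN : Nat) (d0 : PySem.Dict Int Int)
    (hext : ext.length = nN + hN)
    (hd0 : d0.items = [((0 : Int), pvS ext hN)]) (m : Nat) (hm1 : 1 ≤ m) (hmn : m ≤ nN) :
    ((PySem.List.pyRange 1 (m : Int) 1).foldl (GC_step ext (hN : Int)) d0).items =
      (List.range m).map (fun j : Nat => ((j : Int), pvS ext (j + hN) - pvS ext j)) := by
  induction m, hm1 using Nat.le_induction with
  | base =>
    rw [show ((1 : Nat) : Int) = 1 from rfl, PySem.List.pyRange_one_eq_nil (le_refl 1)]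
    simpa [pvS] using hd0
  | succ m hm ih =>
    rw [show ((m + 1 : Nat) : Int) = (m : Int) + 1 from by push_cast; ring,
        PySem.List.pyRange_one_succ_right (by exact_mod_cast Nat.one_le_cast.mpr hm),
        List.foldl_append, List.foldl_cons, List.foldl_nil]
    exact pv_step_items ext hN _ m hm (ih (by omega)) (by omega) (by omega)

theorem pv_addFrom_pref (ext : List Char) :
    ext.foldl (fun p ch =>
      p ++ [PySem.List.pyGetD p (-1) 0 + (if ch == 'G' then 1 else 0) - (if ch == 'C' then 1 else 0)]) [0]
    = (List.range (ext.length + 1)).map (fun k => pvS ext k) := by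
  rw [pv_fold_pref ext 0 [0] (by simp) (by simp)]
  rw [List.range_succ_eq_map, List.map_cons, List.map_map]
  simp [pvS, Function.comp]

-- ===== VERDICT (by name: the statement is the Claim_ definition above) =====
theorem GC_counter_spec : Claim_unchanged_GC_counter := by
  intro G _ hND
  have hGne : G.toList ≠ [] := by
    intro hl
    apply hND
    show G = ""
    have := congrArg String.ofList hl
    simpa using this
  show GC_counter G = GC_counter_alt G
  simp only [GC_counter, GC_counter_alt, PySem.List.len_eq]
  set g := G.toList with hg
  set nN := g.length with hnN
  have hn1 : 1 ≤ nN := List.length_pos_iff.mpr hGne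
  have hfd : PySem.Int.floordiv (nN : Int) 2 = ((nN / 2 : Nat) : Int) := by
    exact_mod_cast PySem.Int.floordiv_natCast nN 2
  rw [hfd]
  set hN := nN / 2 with hhN
  have hle : hN ≤ nN := Nat.div_le_self _ _
  simp only [PySem.List.slice_zero_start, PySem.List.slice_to_natCast]
  set ext := g ++ g.take hN with hext
  have hextlen : ext.length = nN + hN := by
    simp [hext, ← hnN, Nat.min_eq_left hle]
  have hd0 : ((PySem.Dict.empty : PySem.Dict Int Int).insert 0
        ((PySem.List.count (ext.take hN) 'G' : Int) - (PySem.List.count (ext.take hN) 'C' : Int))).items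
      = [((0 : Int), pvS ext hN)] := by
    rw [PySem.Dict.items_insert_of_not_contains _ _ (PySem.Dict.contains_empty 0)]
    simp only [PySem.List.count_eq]
    rw [pv_count_sub (ext.take hN)]
    rfl
  rw [pv_A_loop ext nN hN _ hextlen hd0 nN hn1 (le_refl nN)]
  rw [pv_addFrom_pref ext]
  rw [PySem.Dict.items_foldl_insert_fresh (PySem.List.pyRange 0 (nN : Int) 1) (fun i => i)
        (fun i => PySem.List.pyGetD ((List.range (ext.length + 1)).map (fun k => pvS ext k)) (i + (hN : Int)) 0
                 - PySem.List.pyGetD ((List.range (ext.length + 1)).map (fun k => pvS ext k)) i 0)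
        PySem.Dict.empty
        (fun a _ => PySem.Dict.contains_empty a)
        (by simpa using PySem.List.nodup_pyRange_one 0 (nN : Int))]
  rw [PySem.List.pyRange_zero_nat nN]
  simp only [List.map_map]
  apply List.map_congr_left
  intro j hj
  have hj' : j < nN := List.mem_range.mp hj
  simp only [Function.comp]
  have hc1 : ((j : Int) + (hN : Int)) = ((j + hN : Nat) : Int) := by push_cast; ring
  rw [hc1, PySem.List.pyGetD_natCast, PySem.List.pyGetD_natCast]
  rw [PySem.List.getD_map_range _ _ _ _ (by omega), PySem.List.getD_map_range _ _ _ _ (by omega)]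

theorem GC_counter_changed : Claim_changed_GC_counter := by
  unfold Claim_changed_GC_counter; decide

theorem GC_counter_tight : Claim_exact_GC_counter := by
  intro G _ hD
  subst hD
  decide
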